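-- pv_equiv track=rewrite | github.com/JoshOrndorff/advent-of-code-2016 | 7/7.1.py | supports_tls
-- ===== SOURCE A (Python) =====
-- def contains_abba(text):
--   """ Returns boolean whether given text contains an abba """
--
--   # Terminate if text can't have an abba
--   if len(text) < 4:
--     return False
--
--   # Terminate if text does have an abba
--   if text[0] == text[3] and text[1] == text[2] and text[0] != text[1]:
--     return True
--
--   # Recurse if both cases are still possible
--   return contains_abba(text[1:])
--
-- def supports_tls(add):
--   """ Takes an address pair and returns whether it is real based on ABBA
--       checking. """
--
--   # First check whether the address is disqualified for bracketed ABBAs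
--   for bracketPhrase in add[1]:
--     if contains_abba(bracketPhrase):
--       return False
--
--   # Now check whether the address is qualified for non-bracketed ABBAs
--   for plainPhrase in add[0]:
--     if contains_abba(plainPhrase):
--       return True
--
--   # If neither of the above cases applies, default to  not a real address.
--   return False
-- ===== SOURCE B (Python) =====
-- def contains_abba(text):
--   """ Linear scan over 4-char windows. """
--   return any(text[i] == text[i+3] and text[i+1] == text[i+2] and text[i] != text[i+1]
--              for i in range(len(text) - 3))
--
-- def supports_tls(add):
--   """ Takes an address pair and returns whether it is real based on ABBA
--       checking.  Each DISTINCT phrase is checked once (duplicates collapse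
--       into a set), and each check is a single linear window scan. """
--   return (not any(contains_abba(p) for p in set(add[1]))
--           and any(contains_abba(p) for p in set(add[0])))
-- ===== Notes on version B (the rewrite author's own statement) =====
-- stated objective: alternative
-- what changed: contains_abba becomes a single linear any() over 4-char window start indices instead of quadratic slice-recursion, and supports_tls checks each distinct phrase once (set dedup) inside one boolean expression; it trades A's early exit on the first ABBA phrase for deduplicated whole-list scans.
import Mathlib
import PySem

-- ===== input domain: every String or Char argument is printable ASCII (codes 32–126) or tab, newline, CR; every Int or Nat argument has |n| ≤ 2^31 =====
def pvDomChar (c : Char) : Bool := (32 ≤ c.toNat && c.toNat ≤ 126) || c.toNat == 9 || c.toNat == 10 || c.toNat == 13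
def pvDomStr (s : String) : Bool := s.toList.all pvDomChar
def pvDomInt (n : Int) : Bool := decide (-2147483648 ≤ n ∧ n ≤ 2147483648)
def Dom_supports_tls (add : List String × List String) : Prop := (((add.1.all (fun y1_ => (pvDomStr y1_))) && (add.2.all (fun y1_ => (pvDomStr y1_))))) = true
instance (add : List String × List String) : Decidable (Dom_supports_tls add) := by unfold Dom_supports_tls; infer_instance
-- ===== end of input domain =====

-- B: one linear scan over window start indices instead of quadratic slice-recursion, and
-- each distinct phrase checked once via set dedup; return value only, no side effects.

-- ===== PORT A =====
-- A's contains_abba: length guard, check the first four characters, recurse on text[1:].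
def contains_abbaA (text : List Char) : Bool :=
  if text.length < 4 then false
  else if text.getD 0 ' ' == text.getD 3 ' ' && text.getD 1 ' ' == text.getD 2 ' '
          && !(text.getD 0 ' ' == text.getD 1 ' ') then true
  else contains_abbaA (text.drop 1)
termination_by text.length
decreasing_by simp; omega

-- for-loop with early 'return False' over add[1], then early 'return True' over add[0]
def supports_tls (add : List String × List String) : Bool :=
  if add.2.any (fun bracketPhrase => contains_abbaA bracketPhrase.toList) then false
  else if add.1.any (fun plainPhrase => contains_abbaA plainPhrase.toList) then true
  else false

-- ===== PORT B =====
-- B's contains_abba: any() over window start indices i in range(len-3)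
def contains_abbaB (text : List Char) : Bool :=
  (List.range (text.length - 3)).any (fun i =>
    text.getD i ' ' == text.getD (i+3) ' ' && text.getD (i+1) ' ' == text.getD (i+2) ' '
    && !(text.getD i ' ' == text.getD (i+1) ' '))

-- set(add[1]) / set(add[0]): each distinct phrase is checked once
def supports_tls_alt (add : List String × List String) : Bool :=
  !((PySem.Set.ofList add.2).any (fun p => contains_abbaB p.toList))
  && (PySem.Set.ofList add.1).any (fun p => contains_abbaB p.toList)

-- ===== PRECONDITION & SPEC =====
def Spec_supports_tls (add : List String × List String) (out : Bool) : Prop := out = supports_tls_alt add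
instance (add : List String × List String) (out : Bool) : Decidable (Spec_supports_tls add out) := by unfold Spec_supports_tls; infer_instance

-- ===== CLAIM (what is proved, stated in full; the proofs are below) =====
def Claim_equal_supports_tls : Prop := ∀ (add : List String × List String), Dom_supports_tls add → Spec_supports_tls add (supports_tls add)

-- ===== LEMMAS AND PROOFS =====

theorem getD_drop_one (l : List Char) (i : Nat) :
    (l.drop 1).getD i ' ' = l.getD (i+1) ' ' := by
  cases l <;> simp

theorem any_ofList_eq {α : Type} [BEq α] [LawfulBEq α] (l : List α) (f : α → Bool) :
    (PySem.Set.ofList l).any f = l.any f := by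
  rw [Bool.eq_iff_iff]
  simp only [List.any_eq_true, PySem.Set.mem_ofList]

theorem abba_eq (text : List Char) : contains_abbaA text = contains_abbaB text := by
  induction text using contains_abbaA.induct with
  | case1 text h =>
    rw [contains_abbaA]
    simp only [h, if_true, contains_abbaB]
    have : text.length - 3 = 0 := by omega
    simp [this]
  | case2 text h hw =>
    rw [contains_abbaA, if_neg h, if_pos hw, contains_abbaB]
    obtain ⟨k, hk⟩ : ∃ k, text.length - 3 = k + 1 := ⟨text.length - 4, by omega⟩
    rw [hk, List.range_succ_eq_map, List.any_cons]
    simp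
    exact Or.inl (by simpa using hw)
  | case3 text h hw ih =>
    rw [contains_abbaA, if_neg h, if_neg hw, ih, contains_abbaB, contains_abbaB]
    obtain ⟨k, hk⟩ : ∃ k, text.length - 3 = k + 1 := ⟨text.length - 4, by omega⟩
    have hdl : (text.drop 1).length - 3 = k := by simp; omega
    simp only [Bool.not_eq_true] at hw
    rw [hk, hdl, List.range_succ_eq_map, List.any_cons, List.any_map, hw, Bool.false_or]
    have hfun : (fun i => (text.drop 1).getD i ' ' == (text.drop 1).getD (i+3) ' '
        && (text.drop 1).getD (i+1) ' ' == (text.drop 1).getD (i+2) ' '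
        && !((text.drop 1).getD i ' ' == (text.drop 1).getD (i+1) ' '))
        = ((fun i => text.getD i ' ' == text.getD (i+3) ' '
            && text.getD (i+1) ' ' == text.getD (i+2) ' '
            && !(text.getD i ' ' == text.getD (i+1) ' ')) ∘ (· + 1)) := by
      funext i
      simp only [Function.comp, getD_drop_one]
    rw [hfun]

-- ===== VERDICT (by name: the statement is the Claim_ definition above) =====
theorem supports_tls_spec : Claim_equal_supports_tls := by
  intro add _
  unfold Spec_supports_tls supports_tls supports_tls_alt
  simp only [abba_eq, any_ofList_eq]
  cases h2 : add.2.any (fun p => contains_abbaB p.toList) <;>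
    cases h1 : add.1.any (fun p => contains_abbaB p.toList) <;> simp
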